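-- pv_equiv track=rewrite | github.com/JiaweiHan88/paperclip-orchestrator | ai_tools_bridge/packages/ai_tools_github/src/ai_tools_github/utils/diff.py | split_diff_chunks
-- ===== SOURCE A (Python) =====
-- def split_diff_chunks(content_lines: list[str]) -> list[list[str]]:
--     """
--     Split diff content into chunks separated by @@ markers.
--
--     Args:
--         content_lines: Lines of diff content starting from the first @@
--
--     Returns:
--         List of chunks, where each chunk is a list of lines
--     """
--     chunks: list[list[str]] = []
--     current_chunk: list[str] = []
--
--     for line in content_lines:
--         if line.startswith("@@"):
--             # If we have a current chunk, save it
--             if current_chunk: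
--                 chunks.append(current_chunk)
--                 current_chunk = []
--         current_chunk.append(line)
--
--     # Don't forget the last chunk
--     if current_chunk:
--         chunks.append(current_chunk)
--
--     return chunks
-- ===== SOURCE B (Python) =====
-- def split_diff_chunks(content_lines: list[str]) -> list[list[str]]:
--     """Two-pointer rewrite: find each next '@@' boundary and slice between
--     consecutive boundaries, instead of appending line by line to a buffer."""
--     n = len(content_lines)
--     chunks: list[list[str]] = []
--     i = 0
--     while i < n:
--         j = i + 1
--         while j < n and not content_lines[j].startswith("@@"):
--             j += 1
--         chunks.append(content_lines[i:j])
--         i = j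
--     return chunks
-- ===== Notes on version B (the rewrite author's own statement) =====
-- stated objective: alternative
-- what changed: Replaced the running current-chunk buffer with a two-pointer scan that finds each next '@@' boundary and emits chunks as slices between consecutive boundaries.
import Mathlib
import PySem

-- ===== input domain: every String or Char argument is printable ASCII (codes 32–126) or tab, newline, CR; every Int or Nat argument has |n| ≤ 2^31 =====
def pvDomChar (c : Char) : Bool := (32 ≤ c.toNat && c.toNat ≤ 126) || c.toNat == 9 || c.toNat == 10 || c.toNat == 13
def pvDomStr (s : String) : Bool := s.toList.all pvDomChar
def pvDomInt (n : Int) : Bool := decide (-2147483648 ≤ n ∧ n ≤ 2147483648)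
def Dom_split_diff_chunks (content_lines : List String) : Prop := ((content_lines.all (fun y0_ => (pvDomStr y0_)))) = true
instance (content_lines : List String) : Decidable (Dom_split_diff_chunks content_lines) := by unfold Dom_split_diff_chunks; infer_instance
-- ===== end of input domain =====

-- B replaces A's running current-chunk buffer by a two-pointer boundary scan that slices
-- between consecutive '@@' positions (objective: alternative decomposition, same cost).

-- ===== PORT A =====
-- A's loop body: if line.startswith('@@') and current_chunk: flush; then current_chunk.append(line)
def pvStepA (st : List (List String) × List String) (line : String) : List (List String) × List String :=
  let st := if PySem.Str.startswith line "@@" ∧ st.2 ≠ [] then (st.1 ++ [st.2], ([] : List String)) else st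
  (st.1, st.2 ++ [line])

def split_diff_chunks (content_lines : List String) : List (List String) :=
  let st := content_lines.foldl pvStepA ([], [])
  if st.2 ≠ [] then st.1 ++ [st.2] else st.1

-- ===== PORT B =====
-- inner while loop of Source B: advance j while j < n and content_lines[j] does not start with '@@'
-- (j < n always holds at the indexing, so Python's content_lines[j] is ls.getD j "" exactly)
def pvFindNext (ls : List String) (n j : Nat) : Nat :=
  if j < n ∧ ¬ (PySem.Str.startswith (ls.getD j "") "@@") then pvFindNext ls n (j+1) else j
termination_by n - j
decreasing_by omega

-- needed by pvGoOuter's termination: the boundary scan never moves backwards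
theorem pvFindNext_ge (ls : List String) (n j : Nat) : j ≤ pvFindNext ls n j := by
  unfold pvFindNext
  split
  · have := pvFindNext_ge ls n (j+1); omega
  · exact le_refl j
termination_by n - j
decreasing_by omega

-- outer while loop of Source B: chunks.append(content_lines[i:j]); i = j
def pvGoOuter (ls : List String) (n : Nat) (chunks : List (List String)) (i : Nat) : List (List String) :=
  if i < n then
    let j := pvFindNext ls n (i+1)
    pvGoOuter ls n (chunks ++ [PySem.List.slice ls (some (i : Int)) (some (j : Int))]) j
  else chunks
termination_by n - i
decreasing_by have := pvFindNext_ge ls n (i+1); omega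

def split_diff_chunks_alt (content_lines : List String) : List (List String) :=
  pvGoOuter content_lines content_lines.length [] 0

-- ===== PRECONDITION & SPEC =====
def Spec_split_diff_chunks (content_lines : List String) (out : List (List String)) : Prop := out = split_diff_chunks_alt content_lines
instance (content_lines : List String) (out : List (List String)) : Decidable (Spec_split_diff_chunks content_lines out) := by unfold Spec_split_diff_chunks; infer_instance

-- ===== CLAIM (what is proved, stated in full; the proofs are below) =====
def Claim_equal_split_diff_chunks : Prop := ∀ (content_lines : List String), Dom_split_diff_chunks content_lines → Spec_split_diff_chunks content_lines (split_diff_chunks content_lines)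

-- ===== LEMMAS AND PROOFS =====

-- common characterization: a chunk is its head line plus the following non-'@@' lines
def pvHdr (s : String) : Bool := PySem.Str.startswith s "@@"

def pvChunksOf : List String → List (List String)
  | [] => []
  | l :: t => (l :: t.takeWhile (fun s => !(pvHdr s))) :: pvChunksOf (t.dropWhile (fun s => !(pvHdr s)))
termination_by ls => ls.length
decreasing_by
  have := (List.dropWhile_sublist (l := t) (fun s => !(pvHdr s))).length_le
  simp; omega

theorem take_len_takeWhile {α : Type} (q : α → Bool) (t : List α) :
    t.take (t.takeWhile q).length = t.takeWhile q := by
  induction t with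
  | nil => simp
  | cons a t ih =>
    by_cases h : q a
    · simp [List.takeWhile_cons, h, ih]
    · simp [List.takeWhile_cons, h]

theorem drop_len_takeWhile {α : Type} (q : α → Bool) (t : List α) :
    t.drop (t.takeWhile q).length = t.dropWhile q := by
  induction t with
  | nil => simp
  | cons a t ih =>
    by_cases h : q a
    · simp [List.takeWhile_cons, List.dropWhile_cons, h, ih]
    · simp [List.takeWhile_cons, List.dropWhile_cons, h]

theorem pvFindNext_eq (ls : List String) (j : Nat) (hj : j ≤ ls.length) :
    pvFindNext ls ls.length j = j + ((ls.drop j).takeWhile (fun s => !(pvHdr s))).length := by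
  unfold pvFindNext
  by_cases h : j < ls.length
  · have hdrop : ls.drop j = ls[j] :: ls.drop (j+1) := List.drop_eq_getElem_cons h
    have hget : ls.getD j "" = ls[j] := List.getD_eq_getElem ls "" h
    rw [hget, hdrop]
    by_cases hp : PySem.Str.startswith ls[j] "@@"
    · rw [if_neg (fun hc => hc.2 hp)]
      rw [List.takeWhile_cons, if_neg (by simp only [pvHdr, hp, Bool.not_true]; exact Bool.false_ne_true)]
      simp
    · have hp' : PySem.Str.startswith ls[j] "@@" = false := by
        cases hx : PySem.Str.startswith ls[j] "@@" <;> simp_all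
      rw [if_pos ⟨h, hp⟩, pvFindNext_eq ls (j+1) (by omega)]
      rw [List.takeWhile_cons, if_pos (by simp only [pvHdr, hp', Bool.not_false])]
      simp
      omega
  · have hnil : ls.drop j = [] := List.drop_eq_nil_of_le (by omega)
    rw [if_neg (by simp [h]), hnil]
    simp
termination_by ls.length - j
decreasing_by omega

theorem pvGoOuter_eq (ls : List String) (chunks : List (List String)) (i : Nat) :
    pvGoOuter ls ls.length chunks i = chunks ++ pvChunksOf (ls.drop i) := by
  unfold pvGoOuter
  by_cases h : i < ls.length
  · have hdrop : ls.drop i = ls[i] :: ls.drop (i+1) := List.drop_eq_getElem_cons h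
    have hfn' := pvFindNext_eq ls (i+1) (by omega)
    set t := ls.drop (i+1) with ht
    set L := (t.takeWhile (fun s => !(pvHdr s))).length with hL
    have hslice : PySem.List.slice ls (some (i : Int)) (some ((i + 1 + L : Nat) : Int))
        = ls[i] :: t.takeWhile (fun s => !(pvHdr s)) := by
      rw [PySem.List.slice_natCast, hdrop, show i + 1 + L - i = L + 1 by omega,
        List.take_succ_cons, hL, take_len_takeWhile]
    have hdropj : ls.drop (i + 1 + L) = t.dropWhile (fun s => !(pvHdr s)) := by
      rw [← List.drop_drop, ← ht, hL, drop_len_takeWhile]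
    rw [if_pos h, hfn', pvGoOuter_eq ls _ (i + 1 + L), hslice, hdropj]
    conv_rhs => rw [hdrop, pvChunksOf]
    simp [← ht]
  · have hnil : ls.drop i = [] := List.drop_eq_nil_of_le (by omega)
    rw [if_neg h, hnil]
    simp [pvChunksOf]
termination_by ls.length - i
decreasing_by omega

-- A's fold, once the current chunk is nonempty
theorem foldA (ls : List String) : ∀ (chunks : List (List String)) (cur : List String), cur ≠ [] →
    (if (ls.foldl pvStepA (chunks, cur)).2 ≠ [] then
        (ls.foldl pvStepA (chunks, cur)).1 ++ [(ls.foldl pvStepA (chunks, cur)).2]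
      else (ls.foldl pvStepA (chunks, cur)).1)
    = chunks ++ ((cur ++ ls.takeWhile (fun s => !(pvHdr s))) :: pvChunksOf (ls.dropWhile (fun s => !(pvHdr s)))) := by
  induction ls with
  | nil => intro chunks cur hc; simp [pvChunksOf, hc]
  | cons l t ih =>
    intro chunks cur hc
    by_cases hp : PySem.Str.startswith l "@@"
    · have hstep : pvStepA (chunks, cur) l = (chunks ++ [cur], [l]) := by
        unfold pvStepA; rw [if_pos ⟨hp, hc⟩]; rfl
      rw [List.foldl_cons, hstep, ih (chunks ++ [cur]) [l] (by simp)]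
      have hp'' : pvHdr l = true := hp
      rw [List.takeWhile_cons, List.dropWhile_cons]
      simp only [hp'', Bool.not_true, Bool.false_eq_true, if_false]
      conv_rhs => rw [pvChunksOf]
      simp
    · have hp' : pvHdr l = false := by
        unfold pvHdr; cases hx : PySem.Str.startswith l "@@"
        · rfl
        · exact absurd hx hp
      have hstep : pvStepA (chunks, cur) l = (chunks, cur ++ [l]) := by
        unfold pvStepA; rw [if_neg (fun hcon => hp hcon.1)]
      rw [List.foldl_cons, hstep, ih chunks (cur ++ [l]) (by simp)]
      rw [List.takeWhile_cons, List.dropWhile_cons]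
      simp [hp']

-- ===== VERDICT (by name: the statement is the Claim_ definition above) =====
theorem split_diff_chunks_spec : Claim_equal_split_diff_chunks := by
  intro ls _
  unfold Spec_split_diff_chunks split_diff_chunks split_diff_chunks_alt
  rw [pvGoOuter_eq]
  simp only [List.drop_zero, List.nil_append]
  cases ls with
  | nil => simp [pvChunksOf]
  | cons l t =>
    have hstep : pvStepA ([], []) l = ([], [l]) := by
      unfold pvStepA; rw [if_neg (fun hcon => hcon.2 rfl)]; rfl
    simp only [List.foldl_cons, hstep]
    rw [foldA t [] [l] (by simp)]
    conv_rhs => rw [pvChunksOf]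
    simp
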